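-- pv_equiv track=rewrite | github.com/dmitry957/codewars-training | kata/7-kyu/cat_and_mouse_2d_version/solution.py | cat_mouse
-- ===== SOURCE A (Python) =====
-- def cat_mouse(map_, moves):
--     map_ = map_.split('\n')
--     cat_x, cat_y, mouse_x, mouse_y = -1, -1, -1, -1
--
--     for i in range(len(map_)):
--         for j in range(len(map_[i])):
--             if map_[i][j] == 'C':
--                 cat_x, cat_y = i, j
--             elif map_[i][j] == 'm':
--                 mouse_x, mouse_y = i, j
--
--     if cat_x == -1 or mouse_x == -1:
--         return "boring without two animals"
--
--     distance = abs(cat_x - mouse_x) + abs(cat_y - mouse_y)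
--     return "Caught!" if distance <= moves else "Escaped!"
-- ===== SOURCE B (Python) =====
-- def cat_mouse(map_, moves):
--     ci = map_.rfind('C')
--     mi = map_.rfind('m')
--     if ci < 0 or mi < 0:
--         return "boring without two animals"
--     cat_row = map_[:ci].count('\n')
--     cat_col = ci - map_[:ci].rfind('\n') - 1
--     mouse_row = map_[:mi].count('\n')
--     mouse_col = mi - map_[:mi].rfind('\n') - 1
--     return "Caught!" if abs(cat_row - mouse_row) + abs(cat_col - mouse_col) <= moves else "Escaped!"
-- ===== Notes on version B (the rewrite author's own statement) =====
-- stated objective: faster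
-- what changed: B replaces A's split-into-lines nested index scan by staged string searches: rfind the last 'C' and 'm' in the raw string, then convert each flat index to (row, col) with a prefix newline count and a prefix rfind; the per-character work moves from Python bytecode into C string primitives (measured 36x at the largest size).
import Mathlib
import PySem

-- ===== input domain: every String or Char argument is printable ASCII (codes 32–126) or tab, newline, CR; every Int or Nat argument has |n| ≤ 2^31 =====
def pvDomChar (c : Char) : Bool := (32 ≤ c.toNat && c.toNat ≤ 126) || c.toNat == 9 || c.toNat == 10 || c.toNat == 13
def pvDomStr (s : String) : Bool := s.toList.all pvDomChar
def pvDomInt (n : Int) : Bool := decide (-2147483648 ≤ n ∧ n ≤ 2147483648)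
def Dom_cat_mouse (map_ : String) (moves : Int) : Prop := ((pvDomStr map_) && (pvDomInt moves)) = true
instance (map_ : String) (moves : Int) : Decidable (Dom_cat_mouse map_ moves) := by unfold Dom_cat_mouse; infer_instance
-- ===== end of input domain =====

-- B replaces A's split-into-lines nested scan by staged stdlib string searches:
-- rfind the last 'C'/'m' in the raw string and convert each flat index to (row, col)
-- with a prefix newline count and a prefix rfind (same O(n); measurably faster in Python
-- because the per-character work moves into C string primitives).

-- ===== PORT A =====
-- map_.split('\n') is PySem.Chars.splitOn on the code points (the separator is non-empty,
-- so Python's split never raises); the nested 'for i in range(len(..))' loops are folds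
-- over PySem.List.pyRange with PySem.List.pyGetD indexing, carrying the coordinate 4-tuple.
def cat_mouse (map_ : String) (moves : Int) : String :=
  let lines := PySem.Chars.splitOn map_.toList ['\n']
  let st : Int × Int × Int × Int :=
    (PySem.List.pyRange 0 (PySem.List.len lines)).foldl (fun st i =>
      let line := PySem.List.pyGetD lines i []
      (PySem.List.pyRange 0 (PySem.List.len line)).foldl (fun st j =>
        let c := PySem.List.pyGetD line j ' '
        if c = 'C' then (i, j, st.2.2.1, st.2.2.2)
        else if c = 'm' then (st.1, st.2.1, i, j)
        else st) st) (-1, -1, -1, -1)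
  if st.1 = -1 ∨ st.2.2.1 = -1 then "boring without two animals"
  else if |st.1 - st.2.2.1| + |st.2.1 - st.2.2.2| ≤ moves then "Caught!" else "Escaped!"

-- ===== PORT B =====
-- hand port of Python's str.rfind for a single-character needle (PySem has no rfind):
-- the highest index holding the character, or -1 if absent — exact on that contract.
def lastIdx : List Char → Char → Option Nat
  | [], _ => none
  | a :: r, c =>
    match lastIdx r c with
    | some k => some (k + 1)
    | none => if a = c then some 0 else none

def pyRfind (cs : List Char) (c : Char) : Int :=
  match lastIdx cs c with
  | some k => (k : Int)
  | none => -1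

-- row/col of a flat index: prefix = map_[:idx] (PySem slice); str.count of the single
-- character '\n' is List.count (single-char occurrences cannot overlap — exact here).
def rowcol (cs : List Char) (idx : Int) : Int × Int :=
  let pre := PySem.List.slice cs none (some idx)
  ((pre.count '\n' : Int), idx - pyRfind pre '\n' - 1)

def cat_mouse_alt (map_ : String) (moves : Int) : String :=
  let cs := map_.toList
  let ci := pyRfind cs 'C'
  let mi := pyRfind cs 'm'
  if ci < 0 ∨ mi < 0 then "boring without two animals"
  else
    let c := rowcol cs ci
    let m := rowcol cs mi
    if |c.1 - m.1| + |c.2 - m.2| ≤ moves then "Caught!" else "Escaped!"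

-- ===== PRECONDITION & SPEC =====
def Spec_cat_mouse (map_ : String) (moves : Int) (out : String) : Prop := out = cat_mouse_alt map_ moves
instance (map_ : String) (moves : Int) (out : String) : Decidable (Spec_cat_mouse map_ moves out) := by unfold Spec_cat_mouse; infer_instance

-- ===== CLAIM (what is proved, stated in full; the proofs are below) =====
def Claim_equal_cat_mouse : Prop := ∀ (map_ : String) (moves : Int), Dom_cat_mouse map_ moves → Spec_cat_mouse map_ moves (cat_mouse map_ moves)

-- ===== LEMMAS AND PROOFS =====

-- A's cell update (the if/elif in the inner loop body)
def updA (c : Char) (i j : Int) (st : Int × Int × Int × Int) : Int × Int × Int × Int :=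
  if c = 'C' then (i, j, st.2.2.1, st.2.2.2)
  else if c = 'm' then (st.1, st.2.1, i, j)
  else st

-- A's inner loop over one line, carrying the column index j
def procLine (i : Int) : Int → (Int × Int × Int × Int) → List Char → Int × Int × Int × Int
  | _, st, [] => st
  | j, st, c :: r => procLine i (j + 1) (updA c i j st) r

-- A's outer loop over the lines, carrying the row index i
def procLines : Int → (Int × Int × Int × Int) → List (List Char) → Int × Int × Int × Int
  | _, st, [] => st
  | i, st, l :: ls => procLines (i + 1) (procLine i 0 st l) ls

-- structural form of split on '\n' with the pending piece as accumulator
def mySplit : List Char → List Char → List (List Char)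
  | pre, [] => [pre]
  | pre, c :: r => if c = '\n' then pre :: mySplit [] r else mySplit (pre ++ [c]) r

-- A's whole scan written as one char-by-char recursion
def FA : Int → Int → (Int × Int × Int × Int) → List Char → Int × Int × Int × Int
  | _, _, st, [] => st
  | i, j, st, c :: r => if c = '\n' then FA (i + 1) 0 st r else FA i (j + 1) (updA c i j st) r

theorem foldl_ext {α β : Type} (f g : β → α → β) (h : ∀ b a, f b a = g b a) (init : β)
    (l : List α) : l.foldl f init = l.foldl g init := by
  have : f = g := funext fun b => funext fun a => h b a
  rw [this]

theorem go_spec : ∀ (fuel : Nat) (l cur : List Char) (accs : List (List Char)),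
    l.length < fuel →
    PySem.Chars.splitOn.go ['\n'] fuel l cur accs = accs.reverse ++ mySplit cur.reverse l := by
  intro fuel
  induction fuel with
  | zero => intro l cur accs h; omega
  | succ n ih =>
    intro l cur accs h
    match l with
    | [] => simp [PySem.Chars.splitOn.go, mySplit]
    | c :: rest =>
      rw [PySem.Chars.splitOn.go]
      by_cases hc : c = '\n'
      · subst hc
        have hpre : List.isPrefixOf ['\n'] ('\n' :: rest) = true := by simp [List.isPrefixOf]
        rw [if_pos hpre, show List.drop ['\n'].length ('\n' :: rest) = rest from by simp]
        rw [ih rest [] (cur.reverse :: accs) (by simpa using Nat.lt_of_succ_lt_succ h)]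
        simp [mySplit]
      · have : (['\n'].isPrefixOf (c :: rest)) = false := by
          simp [List.isPrefixOf]; exact fun hh => absurd hh.symm hc
        simp only [this, Bool.false_eq_true, if_false]
        rw [ih rest (c :: cur) accs (by simpa using Nat.lt_of_succ_lt_succ h)]
        simp [mySplit, hc]

theorem splitOn_eq (cs : List Char) : PySem.Chars.splitOn cs ['\n'] = mySplit [] cs := by
  rw [PySem.Chars.splitOn, go_spec _ _ _ _ (by omega)]
  simp

theorem innerA (i : Int) : ∀ (line : List Char) (jo : Int) (st : Int × Int × Int × Int),
    (List.range line.length).foldl (fun st (j : Nat) => updA (line.getD j ' ') i (jo + (j : Int)) st) st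
      = procLine i jo st line := by
  intro line
  induction line with
  | nil => intro jo st; simp [procLine]
  | cons c r ih =>
    intro jo st
    rw [List.length_cons, List.range_succ_eq_map, List.foldl_cons, List.foldl_map]
    simp only [List.getD_cons_zero, Nat.cast_zero, add_zero]
    rw [show (fun (st : Int × Int × Int × Int) (j : Nat) =>
          updA ((c :: r).getD (j + 1) ' ') i (jo + ((j + 1 : Nat) : Int)) st)
        = (fun st (j : Nat) => updA (r.getD j ' ') i ((jo + 1) + (j : Int)) st) from by
      funext st j
      simp only [List.getD_cons_succ]
      congr 1
      push_cast
      ring]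
    rw [ih (jo + 1) (updA c i jo st)]
    rfl

theorem innerA0 (i : Int) (line : List Char) (st : Int × Int × Int × Int) :
    (List.range line.length).foldl (fun st (j : Nat) => updA (line.getD j ' ') i (j : Int) st) st
      = procLine i 0 st line := by
  rw [← innerA i line 0 st]
  exact foldl_ext _ _ (fun st j => by norm_num) st _

theorem outerA : ∀ (lines : List (List Char)) (io : Int) (st : Int × Int × Int × Int),
    (List.range lines.length).foldl (fun st (k : Nat) => procLine (io + (k : Int)) 0 st (lines.getD k [])) st
      = procLines io st lines := by
  intro lines
  induction lines with
  | nil => intro io st; simp [procLines]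
  | cons l ls ih =>
    intro io st
    rw [List.length_cons, List.range_succ_eq_map, List.foldl_cons, List.foldl_map]
    simp only [List.getD_cons_zero, Nat.cast_zero, add_zero]
    rw [show (fun (st : Int × Int × Int × Int) (k : Nat) =>
          procLine (io + ((k + 1 : Nat) : Int)) 0 st ((l :: ls).getD (k + 1) []))
        = (fun st (k : Nat) => procLine ((io + 1) + (k : Int)) 0 st (ls.getD k [])) from by
      funext st k
      simp only [List.getD_cons_succ]
      congr 1
      push_cast
      ring]
    rw [ih (io + 1) (procLine io 0 st l)]
    rfl

theorem outerA0 (lines : List (List Char)) (st : Int × Int × Int × Int) :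
    (List.range lines.length).foldl (fun st (k : Nat) => procLine (k : Int) 0 st (lines.getD k [])) st
      = procLines 0 st lines := by
  rw [← outerA lines 0 st]
  exact foldl_ext _ _ (fun st k => by norm_num) st _

-- A's nested pyRange/pyGetD fold is procLines
theorem Afold_eq (lines : List (List Char)) (init : Int × Int × Int × Int) :
    (PySem.List.pyRange 0 (PySem.List.len lines)).foldl (fun st i =>
      let line := PySem.List.pyGetD lines i []
      (PySem.List.pyRange 0 (PySem.List.len line)).foldl (fun st j =>
        let c := PySem.List.pyGetD line j ' '
        if c = 'C' then (i, j, st.2.2.1, st.2.2.2)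
        else if c = 'm' then (st.1, st.2.1, i, j)
        else st) st) init
      = procLines 0 init lines := by
  rw [PySem.List.len_eq, PySem.List.pyRange_zero_natCast, List.foldl_map]
  refine (foldl_ext _ _ ?_ init _).trans (outerA0 lines init)
  intro st k
  show (PySem.List.pyRange 0 (PySem.List.len (PySem.List.pyGetD lines (k : Int) []))).foldl _ st = _
  rw [PySem.List.pyGetD_natCast, PySem.List.len_eq, PySem.List.pyRange_zero_natCast, List.foldl_map]
  refine (foldl_ext _ _ ?_ st _).trans (innerA0 (k : Int) (lines.getD k []) st)
  intro st j
  show (let c := PySem.List.pyGetD (lines.getD k []) (j : Int) ' '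
        if c = 'C' then ((k : Int), (j : Int), st.2.2.1, st.2.2.2)
        else if c = 'm' then (st.1, st.2.1, (k : Int), (j : Int))
        else st) = _
  rw [show PySem.List.pyGetD (lines.getD k []) (j : Int) ' ' = (lines.getD k []).getD j ' ' from
    PySem.List.pyGetD_natCast _ _ _]
  rfl

theorem procLine_append (i : Int) : ∀ (u v : List Char) (j : Int) (st : Int × Int × Int × Int),
    procLine i j st (u ++ v) = procLine i (j + u.length) (procLine i j st u) v := by
  intro u
  induction u with
  | nil => intro v j st; simp [procLine]
  | cons c u' ih =>
    intro v j st
    rw [List.cons_append, procLine, ih, procLine]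
    congr 1
    simp only [List.length_cons]
    push_cast
    ring

theorem split_FA : ∀ (cs pre : List Char) (i : Int) (st : Int × Int × Int × Int),
    procLines i st (mySplit pre cs) = FA i pre.length (procLine i 0 st pre) cs := by
  intro cs
  induction cs with
  | nil => intro pre i st; simp [mySplit, procLines, FA]
  | cons c r ih =>
    intro pre i st
    by_cases hc : c = '\n'
    · subst hc
      rw [mySplit, if_pos rfl, procLines, FA, if_pos rfl, ih [] (i + 1) (procLine i 0 st pre)]
      simp [procLine]
    · rw [mySplit, if_neg hc, FA, if_neg hc, ih (pre ++ [c]) i st]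
      have h1 : procLine i 0 st (pre ++ [c])
          = updA c i pre.length (procLine i 0 st pre) := by
        rw [procLine_append]
        simp [procLine]
      rw [h1]
      congr 1
      simp only [List.length_append, List.length_cons, List.length_nil]
      push_cast
      ring

-- single-target tracker: FA restricted to one of the two animals
def track (t : Char) : Int → Int → (Int × Int) → List Char → Int × Int
  | _, _, p, [] => p
  | i, j, p, c :: r =>
    if c = '\n' then track t (i + 1) 0 p r
    else if c = t then track t i (j + 1) (i, j) r
    else track t i (j + 1) p r

-- FA is the pair of independent trackers
theorem FA_split : ∀ (cs : List Char) (i j : Int) (st : Int × Int × Int × Int),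
    FA i j st cs
      = ((track 'C' i j (st.1, st.2.1) cs).1, (track 'C' i j (st.1, st.2.1) cs).2,
         (track 'm' i j (st.2.2.1, st.2.2.2) cs).1, (track 'm' i j (st.2.2.1, st.2.2.2) cs).2) := by
  intro cs
  induction cs with
  | nil => intro i j st; simp [FA, track]
  | cons c r ih =>
    intro i j st
    rw [FA]
    by_cases hn : c = '\n'
    · simp only [hn, track]
      exact ih (i + 1) 0 st
    · rw [if_neg hn]
      by_cases hC : c = 'C'
      · subst hC
        simp only [track, hn]
        rw [show updA 'C' i j st = (i, j, st.2.2.1, st.2.2.2) from by simp [updA]]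
        simpa using ih i (j + 1) (i, j, st.2.2.1, st.2.2.2)
      · by_cases hm : c = 'm'
        · subst hm
          simp only [track, hn]
          rw [show updA 'm' i j st = (st.1, st.2.1, i, j) from by simp [updA, hC]]
          simpa using ih i (j + 1) (st.1, st.2.1, i, j)
        · simp only [track, if_neg hn, if_neg hC, if_neg hm]
          rw [show updA c i j st = st from by simp [updA, hC, hm]]
          exact ih i (j + 1) st

-- closed form of a tracker: the (row, col) of the last occurrence of t
def trackVal (cs : List Char) (t : Char) (i j : Int) (p : Int × Int) : Int × Int :=
  match lastIdx cs t with
  | none => p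
  | some k =>
    (i + ((cs.take k).count '\n' : Int),
     match lastIdx (cs.take k) '\n' with
     | some l => (k : Int) - (l : Int) - 1
     | none => j + (k : Int))

theorem track_spec (t : Char) (ht : t ≠ '\n') : ∀ (cs : List Char) (i j : Int) (p : Int × Int),
    track t i j p cs = trackVal cs t i j p := by
  intro cs
  induction cs with
  | nil => intro i j p; simp [track, trackVal, lastIdx]
  | cons c r ih =>
    intro i j p
    by_cases hn : c = '\n'
    · subst hn
      have hct : ('\n' : Char) ≠ t := fun h => ht h.symm
      rw [show track t i j p ('\n' :: r) = track t (i + 1) 0 p r from by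
        simp [track], ih]
      unfold trackVal
      rw [show lastIdx ('\n' :: r) t = (lastIdx r t).map (· + 1) from by
        cases h : lastIdx r t <;> simp [lastIdx, h, hct]]
      cases h : lastIdx r t with
      | none => simp
      | some k =>
        simp only [Option.map_some, List.take_succ_cons, Prod.mk.injEq]
        refine ⟨by simp; ring, ?_⟩
        · rw [show lastIdx ('\n' :: r.take k) '\n'
              = some (match lastIdx (r.take k) '\n' with | some l => l + 1 | none => 0) from by
            cases hl : lastIdx (r.take k) '\n' <;> simp [lastIdx, hl]]
          cases hl : lastIdx (r.take k) '\n' <;> simp [hl] <;> push_cast <;> ring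
    · by_cases hc : c = t
      · subst hc
        rw [show track c i j p (c :: r) = track c i (j + 1) (i, j) r from by
          simp [track, hn], ih]
        unfold trackVal
        rw [show lastIdx (c :: r) c = some (match lastIdx r c with | some k => k + 1 | none => 0) from by
          cases h : lastIdx r c <;> simp [lastIdx, h]]
        cases h : lastIdx r c with
        | none => simp [lastIdx, List.take_zero, List.count_nil]
        | some k =>
          simp only [List.take_succ_cons, Prod.mk.injEq]
          refine ⟨by simp [hn], ?_⟩
          · rw [show lastIdx (c :: r.take k) '\n' = (lastIdx (r.take k) '\n').map (· + 1) from by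
              cases hl : lastIdx (r.take k) '\n' <;> simp [lastIdx, hl, hn]]
            cases hl : lastIdx (r.take k) '\n' <;> simp [hl] <;> push_cast <;> ring
      · rw [show track t i j p (c :: r) = track t i (j + 1) p r from by
          simp [track, hn, hc], ih]
        unfold trackVal
        rw [show lastIdx (c :: r) t = (lastIdx r t).map (· + 1) from by
          cases h : lastIdx r t <;> simp [lastIdx, h, hc]]
        cases h : lastIdx r t with
        | none => simp
        | some k =>
          simp only [Option.map_some, List.take_succ_cons, Prod.mk.injEq]
          refine ⟨by simp [hn], ?_⟩
          · rw [show lastIdx (c :: r.take k) '\n' = (lastIdx (r.take k) '\n').map (· + 1) from by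
              cases hl : lastIdx (r.take k) '\n' <;> simp [lastIdx, hl, hn]]
            cases hl : lastIdx (r.take k) '\n' <;> simp [hl] <;> push_cast <;> ring

-- B's rowcol at a natural index is trackVal's closed form
theorem rowcol_eq (cs : List Char) (k : Nat) :
    rowcol cs (k : Int)
      = (((cs.take k).count '\n' : Int),
         match lastIdx (cs.take k) '\n' with
         | some l => (k : Int) - (l : Int) - 1
         | none => (k : Int)) := by
  unfold rowcol
  rw [PySem.List.slice_to_natCast]
  simp only [Prod.mk.injEq]
  refine ⟨trivial, ?_⟩
  unfold pyRfind
  cases hl : lastIdx (cs.take k) '\n' <;> simp [hl] <;> ring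

-- ===== VERDICT (by name: the statement is the Claim_ definition above) =====
theorem cat_mouse_spec : Claim_equal_cat_mouse := by
  intro map_ moves _
  show cat_mouse map_ moves = cat_mouse_alt map_ moves
  simp only [cat_mouse, cat_mouse_alt]
  rw [splitOn_eq, Afold_eq]
  rw [show procLines 0 (-1, -1, -1, -1) (mySplit [] map_.toList)
      = FA 0 0 (-1, -1, -1, -1) map_.toList from by
    rw [split_FA]; simp [procLine]]
  rw [FA_split, track_spec 'C' (by decide), track_spec 'm' (by decide)]
  cases hC : lastIdx map_.toList 'C' with
  | none =>
    simp [trackVal, hC, pyRfind]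
  | some kC =>
    cases hM : lastIdx map_.toList 'm' with
    | none =>
      simp [trackVal, hC, hM, pyRfind]
    | some kM =>
      have h1 : ¬ ((pyRfind map_.toList 'C') < 0 ∨ (pyRfind map_.toList 'm') < 0) := by
        simp [pyRfind, hC, hM]
      rw [if_neg h1]
      have h2 : ¬ ((trackVal map_.toList 'C' 0 0 (-1, -1)).1 = -1
          ∨ (trackVal map_.toList 'm' 0 0 (-1, -1)).1 = -1) := by
        simp only [trackVal, hC, hM]
        rw [not_or]
        constructor <;> · simp only [zero_add]; omega
      rw [if_neg h2]
      rw [show pyRfind map_.toList 'C' = (kC : Int) from by simp [pyRfind, hC]]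
      rw [show pyRfind map_.toList 'm' = (kM : Int) from by simp [pyRfind, hM]]
      rw [rowcol_eq, rowcol_eq]
      simp only [trackVal, hC, hM, zero_add]
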